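-- pv_equiv track=rewrite | github.com/Rodojodo/Advent-Of-Code-2024 | utils/utils.py | findCharIn2DArray
-- ===== SOURCE A (Python) =====
-- def findCharIn2DArray(twoDArray, target):
--     x=-1
--     y=-1
--     for i in twoDArray:
--         if target in i:
--             x = i.index(target)
--             y = twoDArray.index(i)
--     return [x,y]
-- ===== SOURCE B (Python) =====
-- def findCharIn2DArray(twoDArray, target):
--     for row in reversed(twoDArray):
--         if target in row:
--             return [row.index(target), twoDArray.index(row)]
--     return [-1, -1]
-- ===== Notes on version B (the rewrite author's own statement) =====
-- stated objective: simpler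
-- what changed: B scans the rows in reverse and returns at the first row containing the target (keeping list.index for the row coordinate so duplicate equal rows resolve to the first-equal index like A), instead of A's forward scan that keeps overwriting a running last match.
import Mathlib
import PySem

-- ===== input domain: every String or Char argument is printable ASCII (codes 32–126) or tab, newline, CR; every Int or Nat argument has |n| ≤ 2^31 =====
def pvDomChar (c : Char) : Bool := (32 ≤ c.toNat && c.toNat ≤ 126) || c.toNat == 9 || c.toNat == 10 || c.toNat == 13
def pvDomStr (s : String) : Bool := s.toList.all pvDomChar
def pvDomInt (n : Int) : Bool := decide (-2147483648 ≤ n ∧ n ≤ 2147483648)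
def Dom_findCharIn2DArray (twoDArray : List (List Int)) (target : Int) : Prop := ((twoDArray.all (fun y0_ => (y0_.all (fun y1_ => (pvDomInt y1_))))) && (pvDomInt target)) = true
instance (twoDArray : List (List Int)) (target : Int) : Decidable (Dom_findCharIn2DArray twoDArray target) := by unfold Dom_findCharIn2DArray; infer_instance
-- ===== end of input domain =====

-- B replaces A's forward scan with a running last match by a reverse scan returning at the
-- first matching row (same values, simpler control flow); objective: simpler.

-- ===== PORT A =====
-- A: forward loop keeping (x, y), overwritten at every row containing the target.
def findCharIn2DArray (twoDArray : List (List Int)) (target : Int) : List Int :=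
  let s := twoDArray.foldl
    (fun (s : Int × Int) i =>
      if target ∈ i then
        ((((PySem.List.index? i target).getD 0 : Nat) : Int),
         (((PySem.List.index? twoDArray i).getD 0 : Nat) : Int))
      else s)
    (-1, -1)
  [s.1, s.2]

-- ===== PORT B =====
-- B: scan the reversed list, return at the first row containing the target.
def pvAltGo (twoDArray : List (List Int)) (target : Int) : List (List Int) → List Int
  | [] => [-1, -1]
  | r :: rest =>
    if target ∈ r then
      [(((PySem.List.index? r target).getD 0 : Nat) : Int),
       (((PySem.List.index? twoDArray r).getD 0 : Nat) : Int)]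
    else pvAltGo twoDArray target rest

def findCharIn2DArray_alt (twoDArray : List (List Int)) (target : Int) : List Int :=
  pvAltGo twoDArray target twoDArray.reverse

-- ===== PRECONDITION & SPEC =====
def Spec_findCharIn2DArray (twoDArray : List (List Int)) (target : Int) (out : List Int) : Prop := out = findCharIn2DArray_alt twoDArray target
instance (twoDArray : List (List Int)) (target : Int) (out : List Int) : Decidable (Spec_findCharIn2DArray twoDArray target out) := by unfold Spec_findCharIn2DArray; infer_instance

-- ===== CLAIM (what is proved, stated in full; the proofs are below) =====
def Claim_equal_findCharIn2DArray : Prop := ∀ (twoDArray : List (List Int)) (target : Int), Dom_findCharIn2DArray twoDArray target → Spec_findCharIn2DArray twoDArray target (findCharIn2DArray twoDArray target)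

-- ===== LEMMAS AND PROOFS =====

-- Core: A's fold over a scanned prefix L equals B's first-match scan of L.reverse
-- (the full twoDArray used for the y-coordinate is held fixed in both).
theorem pv_fold_eq_rev (twoDArray : List (List Int)) (target : Int) (L : List (List Int)) :
    (let s := L.foldl
      (fun (s : Int × Int) i =>
        if target ∈ i then
          ((((PySem.List.index? i target).getD 0 : Nat) : Int),
           (((PySem.List.index? twoDArray i).getD 0 : Nat) : Int))
        else s)
      (-1, -1)
     [s.1, s.2]) = pvAltGo twoDArray target L.reverse := by
  induction L using List.reverseRecOn with
  | nil => simp [pvAltGo]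
  | append_singleton L r ih =>
    simp only [List.foldl_append, List.foldl_cons, List.foldl_nil, List.reverse_append,
      List.reverse_cons, List.reverse_nil, List.nil_append, List.singleton_append, pvAltGo]
    by_cases h : target ∈ r
    · simp [h]
    · simpa [h] using ih

-- ===== VERDICT (by name: the statement is the Claim_ definition above) =====
theorem findCharIn2DArray_spec : Claim_equal_findCharIn2DArray := by
  intro twoDArray target _
  unfold Spec_findCharIn2DArray findCharIn2DArray findCharIn2DArray_alt
  exact pv_fold_eq_rev twoDArray target twoDArray
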